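-- pv_equiv track=rewrite | github.com/jlumbroso/slacktivate | src/slacktivate/helpers/dict_serializer.py | add_missing_dict_fields
-- ===== SOURCE A (Python) =====
-- import typing
--
-- def add_missing_dict_fields(
--         list_of_dicts: typing.List[typing.Dict[typing.Any, typing.Any]],
-- ) -> typing.List[typing.Dict[typing.Any, typing.Any]]:
--
--     fields = list()
--
--     for d in list_of_dicts:
--         for field in d.keys():
--             if field in fields:
--                 continue
--             fields.append(field)
--
--     list_of_dicts_with_missing_fields = [
--         {
--             field: d.get(field, "")
--             for field in fields
--         }
--         for d in list_of_dicts
--     ]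
--
--     return list_of_dicts_with_missing_fields
-- ===== SOURCE B (Python) =====
-- import typing
--
--
-- def add_missing_dict_fields(
--         list_of_dicts: typing.List[typing.Dict[typing.Any, typing.Any]],
-- ) -> typing.List[typing.Dict[typing.Any, typing.Any]]:
--     # Single online pass: build the output as we go; whenever a dict introduces
--     # previously unseen fields, retroactively patch every record already built
--     # with "" for those fields (dict insertion order keeps the global field order).
--     result = []
--     fields = []
--     for d in list_of_dicts:
--         new_fields = [k for k in d if k not in fields]
--         if new_fields:
--             blanks = {k: "" for k in new_fields}
--             for r in result:
--                 r.update(blanks)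
--             fields.extend(new_fields)
--         row = {}
--         for f in fields:
--             row[f] = d.get(f, "")
--         result.append(row)
--     return result
-- ===== Notes on version B (the rewrite author's own statement) =====
-- stated objective: alternative
-- what changed: B replaces A's two staged passes (collect the full field union, then rebuild every record against it) with a single online pass that emits each output record immediately and, when a dict introduces previously unseen fields, retroactively patches the already-emitted records with "" for those fields.
import Mathlib
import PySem

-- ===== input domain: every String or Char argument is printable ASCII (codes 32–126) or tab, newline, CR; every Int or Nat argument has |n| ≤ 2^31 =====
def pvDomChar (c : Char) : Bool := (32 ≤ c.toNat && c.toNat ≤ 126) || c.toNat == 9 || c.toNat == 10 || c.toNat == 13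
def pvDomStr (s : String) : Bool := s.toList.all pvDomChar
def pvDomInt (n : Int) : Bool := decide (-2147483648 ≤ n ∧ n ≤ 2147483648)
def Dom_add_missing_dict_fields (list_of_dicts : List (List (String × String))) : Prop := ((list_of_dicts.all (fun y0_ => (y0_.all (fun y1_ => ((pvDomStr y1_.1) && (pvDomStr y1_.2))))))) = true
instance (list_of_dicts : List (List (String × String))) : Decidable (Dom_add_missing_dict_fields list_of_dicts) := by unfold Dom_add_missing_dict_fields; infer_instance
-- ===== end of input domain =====

-- B normalizes in ONE online pass: it builds output records as it goes and retroactively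
-- patches earlier records when a dict introduces new fields, instead of A's two staged
-- passes (collect all fields, then rebuild every record) — objective: alternative decomposition.


-- ===== PORT A =====
def add_missing_dict_fields (list_of_dicts : List (List (String × String))) : List (List (String × String)) :=
  let fields := list_of_dicts.foldl
    (fun fields d =>
      (PySem.Dict.mk d).keys.foldl
        (fun fields field => if field ∈ fields then fields else fields ++ [field]) fields)
    []
  list_of_dicts.map (fun d => fields.map (fun field => (field, (PySem.Dict.mk d).getD field "")))

-- ===== PORT B =====
-- one iteration of Source B's loop body: state = (result so far, fields so far)
def pvStepB (st : List (List (String × String)) × List String) (d : List (String × String)) :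
    List (List (String × String)) × List String :=
  let newFields := (PySem.Dict.mk d).keys.filter (fun k => decide (k ∉ st.2))
  let st' :=
    if newFields.isEmpty then st
    else
      let blanks := newFields.map (fun k => (k, ""))
      (st.1.map (fun r => ((PySem.Dict.mk r).update blanks).items), st.2 ++ newFields)
  let row := (st'.2.foldl (fun row f => row.insert f ((PySem.Dict.mk d).getD f "")) PySem.Dict.empty).items
  (st'.1 ++ [row], st'.2)

def add_missing_dict_fields_alt (list_of_dicts : List (List (String × String))) : List (List (String × String)) :=
  (list_of_dicts.foldl pvStepB ([], [])).1

-- ===== PRECONDITION & SPEC =====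
-- Pre_ requires each inner association list to have pairwise-distinct keys — the invariant every
-- Python dict satisfies by construction (duplicate-key association lists correspond to no Python input;
-- on them first-match lookup vs overwrite semantics is an arbitrary choice).
def Pre_add_missing_dict_fields (list_of_dicts : List (List (String × String))) : Prop :=
  ∀ d ∈ list_of_dicts, (d.map Prod.fst).Nodup
instance (list_of_dicts : List (List (String × String))) : Decidable (Pre_add_missing_dict_fields list_of_dicts) := by unfold Pre_add_missing_dict_fields; infer_instance

def pvWitness_add_missing_dict_fields : (List (List (String × String))) :=
  [[("a", "1"), ("b", "2")], [("b", "3"), ("c", "4")]]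

def Spec_add_missing_dict_fields (list_of_dicts : List (List (String × String))) (out : List (List (String × String))) : Prop := out = add_missing_dict_fields_alt list_of_dicts
instance (list_of_dicts : List (List (String × String))) (out : List (List (String × String))) : Decidable (Spec_add_missing_dict_fields list_of_dicts out) := by unfold Spec_add_missing_dict_fields; infer_instance

-- ===== CLAIM (what is proved, stated in full; the proofs are below) =====
def Claim_equal_add_missing_dict_fields : Prop := ∀ (list_of_dicts : List (List (String × String))), Dom_add_missing_dict_fields list_of_dicts → Pre_add_missing_dict_fields list_of_dicts → Spec_add_missing_dict_fields list_of_dicts (add_missing_dict_fields list_of_dicts)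

-- ===== LEMMAS AND PROOFS =====

-- A's accumulated field list after a prefix of dicts (exactly A's fields fold).
def pvAF (p : List (List (String × String))) : List String :=
  p.foldl
    (fun fields d =>
      (PySem.Dict.mk d).keys.foldl
        (fun fields field => if field ∈ fields then fields else fields ++ [field]) fields)
    []

-- A's inner dedup loop is Set.update.
theorem pv_inner (fs : List String) (ks : List String) :
    ks.foldl (fun fields field => if field ∈ fields then fields else fields ++ [field]) fs
      = PySem.Set.update fs ks := by
  have h : (fun (fields : List String) (field : String) =>
      if field ∈ fields then fields else fields ++ [field]) = PySem.Set.add := by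
    funext fs k
    exact (PySem.Set.add_eq_ite fs k).symm
  rw [h]
  rfl

theorem pvAF_snoc (p : List (List (String × String))) (d : List (String × String)) :
    pvAF (p ++ [d]) = PySem.Set.update (pvAF p) (PySem.Dict.mk d).keys := by
  simp [pvAF, List.foldl_append, pv_inner]

theorem pvAF_nodup (p : List (List (String × String))) : (pvAF p).Nodup := by
  induction p using List.reverseRecOn with
  | nil => simp [pvAF]
  | append_singleton p d ih =>
    rw [pvAF_snoc]
    exact PySem.Set.nodup_update _ _ ih

theorem mem_pvAF (p : List (List (String × String))) (d : List (String × String))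
    (hd : d ∈ p) (k : String) (hk : k ∈ (PySem.Dict.mk d).keys) : k ∈ pvAF p := by
  induction p using List.reverseRecOn with
  | nil => cases hd
  | append_singleton p e ih =>
    rw [pvAF_snoc, PySem.Set.mem_update]
    rcases List.mem_append.mp hd with h | h
    · exact Or.inl (ih h)
    · rcases List.mem_singleton.mp h with rfl
      exact Or.inr hk

theorem pvAF_snoc_filter (p : List (List (String × String))) (d : List (String × String))
    (hnd : ((PySem.Dict.mk d).keys).Nodup) :
    pvAF (p ++ [d])
      = pvAF p ++ ((PySem.Dict.mk d).keys).filter (fun k => decide (k ∉ pvAF p)) := by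
  rw [pvAF_snoc, PySem.Set.update_eq_append_filter, PySem.Set.ofList_eq_self_of_nodup _ hnd]
  congr 1
  apply List.filter_congr
  intro k _
  by_cases h : k ∈ pvAF p <;> simp [PySem.Set.contains, h]

-- a fold of fresh inserts from the empty dict lists exactly (f, g f) over a Nodup field list
theorem pv_row (F : List String) (g : String → String) (hF : F.Nodup) :
    (F.foldl (fun row f => row.insert f (g f)) PySem.Dict.empty).items
      = F.map (fun f => (f, g f)) := by
  have h := PySem.Dict.items_foldl_insert_fresh F (fun f => f) g PySem.Dict.empty
    (fun a _ => by simp) (by simpa using hF)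
  simpa using h

-- overlaying fresh blank fields onto a fully-populated record appends them
theorem pv_patch (F newF : List String) (g : String → String)
    (hnewNodup : newF.Nodup) (hdisj : ∀ k ∈ newF, k ∉ F) :
    ((PySem.Dict.mk (F.map (fun f => (f, g f)))).update (newF.map (fun k => (k, "")))).items
      = F.map (fun f => (f, g f)) ++ newF.map (fun k => (k, "")) := by
  have h := PySem.Dict.items_foldl_insert_fresh (newF.map (fun k => (k, ("" : String))))
    Prod.fst Prod.snd (PySem.Dict.mk (F.map (fun f => (f, g f))))
    (fun a ha => by
      rcases List.mem_map.mp ha with ⟨k, hk, rfl⟩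
      rw [PySem.Dict.contains_eq_decide_mem_keys]
      simp only [PySem.Dict.keys]
      simp [hdisj k hk])
    (by simpa [Function.comp_def] using hnewNodup)
  simp only [PySem.Dict.update]
  rw [h]
  simp

-- the single-pass invariant: after any prefix p, B's state is
-- (p's records filled to pvAF p, pvAF p)
theorem pv_inv (p : List (List (String × String)))
    (hpre : ∀ d ∈ p, (d.map Prod.fst).Nodup) :
    p.foldl pvStepB ([], [])
      = (p.map (fun d' => (pvAF p).map (fun f => (f, (PySem.Dict.mk d').getD f ""))), pvAF p) := by
  induction p using List.reverseRecOn with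
  | nil => rfl
  | append_singleton p d ih =>
    have hpre' : ∀ d' ∈ p, (d'.map Prod.fst).Nodup :=
      fun d' hd' => hpre d' (List.mem_append.mpr (Or.inl hd'))
    have hndk : ((PySem.Dict.mk d).keys).Nodup := by
      simpa [PySem.Dict.keys] using hpre d (List.mem_append.mpr (Or.inr (List.mem_singleton.mpr rfl)))
    rw [List.foldl_append, List.foldl_cons, List.foldl_nil, ih hpre']
    set F := pvAF p with hFdef
    set newF := ((PySem.Dict.mk d).keys).filter (fun k => decide (k ∉ F)) with hnewdef
    have hAF' : pvAF (p ++ [d]) = F ++ newF := pvAF_snoc_filter p d hndk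
    have hFnodup : F.Nodup := pvAF_nodup p
    have hF'nodup : (F ++ newF).Nodup := by rw [← hAF']; exact pvAF_nodup _
    have hnewNodup : newF.Nodup := (List.nodup_append.mp hF'nodup).2.1
    have hdisj : ∀ k ∈ newF, k ∉ F := by
      intro k hk
      have := List.of_mem_filter hk
      simpa using this
    have hnewBlank : ∀ d', d' ∈ p → ∀ k ∈ newF, (PySem.Dict.mk d').getD k "" = "" := by
      intro d' hd' k hk
      apply PySem.Dict.getD_of_not_contains
      rw [PySem.Dict.contains_eq_decide_mem_keys]
      simp only [decide_eq_false_iff_not]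
      intro hmem
      exact hdisj k hk (mem_pvAF p d' hd' k hmem)
    by_cases hempty : newF.isEmpty
    · have hnil : newF = [] := List.isEmpty_iff.mp hempty
      have hAF'' : pvAF (p ++ [d]) = F := by rw [hAF', hnil, List.append_nil]
      simp only [pvStepB, ← hnewdef, hempty, if_pos]
      rw [pv_row F _ hFnodup]
      rw [hAF'']
      simp
    · simp only [pvStepB, ← hnewdef, hempty, if_neg, Bool.false_eq_true, not_false_iff]
      rw [pv_row (F ++ newF) _ hF'nodup]
      rw [hAF']
      simp only [List.map_append, List.map_map]
      refine Prod.ext ?_ rfl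
      refine congrArg₂ (α := List (List (String × String))) (· ++ ·) ?_ ?_
      · apply List.map_congr_left
        intro d' hd'
        simp only [Function.comp_apply]
        rw [pv_patch F newF _ hnewNodup hdisj]
        refine congrArg₂ (α := List (String × String)) (· ++ ·) rfl ?_
        apply List.map_congr_left
        intro k hk
        rw [hnewBlank d' hd' k hk]
      · simp

-- ===== VERDICT (by name: the statement is the Claim_ definition above) =====
theorem add_missing_dict_fields_spec : Claim_equal_add_missing_dict_fields := by
  intro lds _ hpre
  show add_missing_dict_fields lds = add_missing_dict_fields_alt lds
  unfold add_missing_dict_fields add_missing_dict_fields_alt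
  rw [pv_inv lds hpre]
  rfl
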